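-- pv_equiv track=rewrite | github.com/wonda-tea-coffee/competitive_programming.py | atcoder/abc104_b.py | check
-- ===== SOURCE A (Python) =====
-- def check(s):
--     if s[0] != "A": return False
--     if s[2:-1].count("C") != 1: return False
--     cnt = 0
--     for i in range(len(s)):
--         if "a" <= s[i] <= "z":
--             cnt += 1
--     return cnt == len(s)-2
-- ===== SOURCE B (Python) =====
-- import re
--
--
-- def check(s):
--     if s[0] != "A":
--         return False
--     return re.fullmatch(r"[a-z]+C[a-z]+", s[1:]) is not None
-- ===== Notes on version B (the rewrite author's own statement) =====
-- stated objective: idiomatic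
-- what changed: Replaced the slice-count test and the explicit lowercase-counting loop by a single regex fullmatch of [a-z]+C[a-z]+ against s[1:] after the s[0]=='A' guard.
import Mathlib
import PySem

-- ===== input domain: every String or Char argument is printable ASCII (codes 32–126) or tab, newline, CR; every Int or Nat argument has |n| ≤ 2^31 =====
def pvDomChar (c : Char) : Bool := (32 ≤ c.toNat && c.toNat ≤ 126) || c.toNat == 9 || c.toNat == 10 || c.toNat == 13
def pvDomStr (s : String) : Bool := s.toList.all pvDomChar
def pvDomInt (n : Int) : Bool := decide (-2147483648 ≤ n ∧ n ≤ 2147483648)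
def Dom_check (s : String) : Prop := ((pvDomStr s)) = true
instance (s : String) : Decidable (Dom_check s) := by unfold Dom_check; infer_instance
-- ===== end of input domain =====

-- B replaces A's slice-count test and explicit lowercase-counting loop by a regex-style
-- full match of [a-z]+C[a-z]+ against s[1:] after the s[0]=='A' guard (idiomatic rewrite).


-- ===== PORT A =====
def check (s : String) : Bool :=
  match PySem.Str.pyGet? s 0 with          -- s[0]; none = IndexError, excluded by Pre_check
  | none => false
  | some c0 =>
    if c0 ≠ 'A' then false
    else if (PySem.List.slice s.toList (some 2) (some (-1))).count 'C' ≠ 1 then false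
    else
      let cnt : Int :=
        (PySem.List.pyRange 0 (PySem.List.len s.toList) 1).foldl
          (fun cnt i =>
            if 'a' ≤ PySem.List.pyGetD s.toList i ' ' ∧ PySem.List.pyGetD s.toList i ' ' ≤ 'z'
            then cnt + 1 else cnt) 0
      cnt == PySem.List.len s.toList - 2

-- ===== PORT B =====
-- Exact matcher for re.fullmatch(r"[a-z]+C[a-z]+", t): since [a-z] never matches 'C', a
-- match decomposes uniquely as the maximal lowercase prefix, a literal 'C', then a
-- nonempty all-lowercase tail.
def reFullmatchLowCLow (t : List Char) : Bool :=
  match t.drop (t.takeWhile (fun c => 'a' ≤ c && c ≤ 'z')).length with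
  | 'C' :: q => !(t.takeWhile (fun c => 'a' ≤ c && c ≤ 'z')).isEmpty
                  && !q.isEmpty && q.all (fun c => 'a' ≤ c && c ≤ 'z')
  | _ => false

def check_alt (s : String) : Bool :=
  match PySem.Str.pyGet? s 0 with          -- s[0]; none = IndexError, excluded by Pre_check
  | none => false
  | some c0 =>
    if c0 ≠ 'A' then false
    else reFullmatchLowCLow (PySem.List.slice s.toList (some 1) none)

-- ===== PRECONDITION & SPEC =====
-- Pre_ excludes only the empty string, on which A (and B alike) raises IndexError at s[0].
def Pre_check (s : String) : Prop := s.toList ≠ []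
instance (s : String) : Decidable (Pre_check s) := by unfold Pre_check; infer_instance
def pvWitness_check : String := "AxCx"
def Spec_check (s : String) (out : Bool) : Prop := out = check_alt s
instance (s : String) (out : Bool) : Decidable (Spec_check s out) := by unfold Spec_check; infer_instance

-- ===== CLAIM (what is proved, stated in full; the proofs are below) =====
def Claim_equal_check : Prop := ∀ (s : String), Dom_check s → Pre_check s → Spec_check s (check s)

-- ===== LEMMAS AND PROOFS =====

def lowc (c : Char) : Bool := 'a' ≤ c && c ≤ 'z'

theorem tail_take' (l : List Char) (n : Nat) : (l.take n).tail = l.tail.take (n - 1) := by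
  cases l <;> cases n <;> simp

theorem slice_two_neg_one (xs : List Char) :
    PySem.List.slice xs (some 2) (some (-1)) = xs.dropLast.drop 2 := by
  unfold PySem.List.slice PySem.List.clampIdx
  rcases xs with _|⟨a,_|⟨b,t⟩⟩
  · simp
  · simp
  · simp [List.dropLast_eq_take, tail_take']
    split_ifs with h
    · omega
    · omega

theorem drop_takeWhile_len (t : List Char) :
    t.drop (t.takeWhile lowc).length = t.dropWhile lowc := by
  nth_rewrite 2 [← List.takeWhile_append_dropWhile (p := lowc) (l := t)]
  rw [List.drop_left]

theorem B_eq (t : List Char) : reFullmatchLowCLow t =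
    (match t.dropWhile lowc with
     | d :: q => d == 'C' && (!(t.takeWhile lowc).isEmpty && !q.isEmpty && q.all lowc)
     | [] => false) := by
  unfold reFullmatchLowCLow
  rw [show (fun c : Char => 'a' ≤ c && c ≤ 'z') = lowc from rfl, drop_takeWhile_len]
  cases hr : t.dropWhile lowc with
  | nil => rfl
  | cons d q =>
    show _ = (d == 'C' && (!(t.takeWhile lowc).isEmpty && !q.isEmpty && q.all lowc))
    by_cases hd : d = 'C'
    · subst hd; simp
    · have hne : (d == 'C') = false := by simp [hd]
      rw [hne, Bool.false_and]
      split
      · next q' heq => cases heq; exact absurd rfl hd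
      · rfl

theorem int_beq_eq_decide (a b : Int) : (a == b) = decide (a = b) := by
  by_cases h : a = b <;> simp [h]

theorem notC_of_low {c : Char} (h : lowc c = true) : c ≠ 'C' := by
  intro he; subst he; exact absurd h (by decide)

theorem countP_not_zero {l : List Char} (h : ∀ c ∈ l, lowc c = true) :
    l.countP (fun c => !lowc c) = 0 :=
  List.countP_eq_zero.mpr (by intro c hc; simp [h c hc])

theorem key (rest : List Char) :
    (if (('A' :: rest).dropLast.drop 2).count 'C' ≠ 1 then false
     else decide (((('A' :: rest).countP lowc : Nat) : Int) = (('A' :: rest).length : Int) - 2))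
    = reFullmatchLowCLow rest := by
  have hlen : rest.length = rest.countP lowc + rest.countP (fun c => !lowc c) := by
    simpa using List.length_eq_countP_add_countP (p := lowc) (l := rest)
  have hA : ('A' :: rest).countP lowc = rest.countP lowc := by
    rw [List.countP_cons, show lowc 'A' = false by decide]; simp
  have hC2 : ((('A' :: rest).countP lowc : Int) = (('A' :: rest).length : Int) - 2)
      ↔ rest.countP (fun c => !lowc c) = 1 := by
    rw [hA]; simp only [List.length_cons]; push_cast; omega
  obtain ⟨p, hp⟩ : ∃ p, rest.takeWhile lowc = p := ⟨_, rfl⟩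
  have hpall : ∀ c ∈ p, lowc c = true := by
    rw [← hp]; exact fun c hc => List.mem_takeWhile_imp hc
  have hpn : p.countP (fun c => !lowc c) = 0 := countP_not_zero hpall
  have hpC : 'C' ∉ p := fun hc => notC_of_low (hpall _ hc) rfl
  rw [B_eq, hp]
  cases hr : rest.dropWhile lowc with
  | nil =>
    have hrest : rest = p := by
      have := List.takeWhile_append_dropWhile (p := lowc) (l := rest)
      rw [hr, hp, List.append_nil] at this; exact this.symm
    have h0 : rest.countP (fun c => !lowc c) = 0 := by rw [hrest]; exact hpn
    split_ifs with h
    · rfl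
    · exact decide_eq_false (by rw [hC2]; omega)
  | cons d q =>
    have hsplit : rest = p ++ d :: q := by
      have := List.takeWhile_append_dropWhile (p := lowc) (l := rest)
      rw [hr, hp] at this; exact this.symm
    have hd : lowc d = false := by
      have := List.head?_dropWhile_not (p := lowc) (l := rest)
      rw [hr] at this; simpa using this
    have hcnt : rest.countP (fun c => !lowc c) = 1 + q.countP (fun c => !lowc c) := by
      rw [hsplit, List.countP_append, hpn, List.countP_cons]
      simp [hd]; omega
    by_cases hdC : d = 'C'
    · subst hdC
      have hC2' : ((('A' :: rest).countP lowc : Int) = (('A' :: rest).length : Int) - 2)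
          ↔ q.countP (fun c => !lowc c) = 0 := by rw [hC2, hcnt]; omega
      cases q with
      | nil =>
        have hdl2 : ('A' :: rest).dropLast.drop 2 = p.drop 1 := by
          rw [hsplit, show ('A' :: (p ++ ['C'])) = ('A' :: p) ++ ['C'] by simp,
            List.dropLast_concat]
          rfl
        have hcount0 : (('A' :: rest).dropLast.drop 2).count 'C' = 0 := by
          rw [hdl2, List.count_eq_zero]
          intro hm; exact hpC ((List.drop_subset _ _) hm)
        split_ifs with h
        · simp
        · exact absurd (by rw [hcount0]; decide) h
      | cons q0 q' =>
        have hdl2 : ('A' :: rest).dropLast.drop 2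
            = (p ++ 'C' :: (q0 :: q').dropLast).drop 1 := by
          rw [hsplit, show ('A' :: (p ++ 'C' :: q0 :: q')) = ('A' :: p) ++ ('C' :: q0 :: q') by simp,
            List.dropLast_append_of_ne_nil (by simp), List.dropLast_cons₂]
          rfl
        have hq'sub : (q0 :: q').dropLast ⊆ q0 :: q' := (List.dropLast_sublist _).subset
        cases p with
        | nil =>
          have hslice : ('A' :: rest).dropLast.drop 2 = (q0 :: q').dropLast := by
            rw [hdl2]; rfl
          split_ifs with h
          · simp
          · have h1 : ((q0 :: q').dropLast).count 'C' = 1 := by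
              rw [← hslice]; omega
            have hm : 'C' ∈ q0 :: q' := hq'sub (List.count_pos_iff.mp (by omega))
            have hnz : (q0 :: q').countP (fun c => !lowc c) ≠ 0 := by
              intro h0
              have := List.countP_eq_zero.mp h0 'C' hm
              simp at this
              exact absurd this (by decide)
            rw [decide_eq_false (by rw [hC2']; exact hnz)]
            simp
        | cons p0 p' =>
          have hslice : ('A' :: rest).dropLast.drop 2 = p' ++ 'C' :: (q0 :: q').dropLast := by
            rw [hdl2]; rfl
          have hp'C : 'C' ∉ p' := fun hc => hpC (List.mem_cons_of_mem _ hc)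
          have hcount : (('A' :: rest).dropLast.drop 2).count 'C'
              = 1 + ((q0 :: q').dropLast).count 'C' := by
            rw [hslice, List.count_append, List.count_eq_zero.mpr hp'C]
            simp [List.count_cons_self]
            omega
          by_cases hql : ∀ c ∈ q0 :: q', lowc c = true
          · have hqC : 'C' ∉ (q0 :: q').dropLast := fun hc =>
              notC_of_low (hql _ (hq'sub hc)) rfl
            rw [if_neg (by rw [hcount, List.count_eq_zero.mpr hqC]; omega)]
            rw [decide_eq_true (by rw [hC2']; exact countP_not_zero hql)]
            simp [List.all_eq_true.mpr hql]
          · have hq0 : (q0 :: q').countP (fun c => !lowc c) ≠ 0 := by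
              intro h0
              exact hql (by
                intro c hc
                have := List.countP_eq_zero.mp h0 c hc
                simpa using this)
            have hqall : (q0 :: q').all lowc = false := by
              rw [Bool.eq_false_iff]
              intro hall
              exact hql (List.all_eq_true.mp hall)
            split_ifs with h
            · simp [hqall]
            · rw [decide_eq_false (by rw [hC2']; exact hq0)]
              simp [hqall]
    · -- d ≠ 'C' : both sides are false
      have hBf : (d == 'C') = false := by simp [hdC]
      split_ifs with h
      · simp [hBf]
      · have hcnt1 : (('A' :: rest).dropLast.drop 2).count 'C' = 1 := by omega
        have hmem : 'C' ∈ 'A' :: rest :=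
          (List.dropLast_sublist _).subset
            ((List.drop_subset _ _) (List.count_pos_iff.mp (by rw [hcnt1]; decide)))
        have hmem' : 'C' ∈ rest := by
          rcases List.mem_cons.mp hmem with h' | h'
          · exact absurd h' (by decide)
          · exact h'
        have hnC2 : ¬ ((('A' :: rest).countP lowc : Int) = (('A' :: rest).length : Int) - 2) := by
          rw [hC2, hcnt]
          intro hone
          have hq0 : q.countP (fun c => !lowc c) = 0 := by omega
          have hql : ∀ c ∈ q, lowc c = true := by
            intro c hc
            have := List.countP_eq_zero.mp hq0 c hc
            simpa using this
          rw [hsplit] at hmem'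
          rcases List.mem_append.mp hmem' with hm | hm
          · exact hpC hm
          · rcases List.mem_cons.mp hm with hm' | hm'
            · exact hdC hm'.symm
            · exact notC_of_low (hql _ hm') rfl
        rw [decide_eq_false hnC2]
        simp [hBf]

theorem pred_eq : (fun c : Char => decide ('a' ≤ c ∧ c ≤ 'z')) = lowc := by
  funext c; unfold lowc; by_cases h1 : 'a' ≤ c <;> by_cases h2 : c ≤ 'z' <;> simp [h1, h2]

theorem pyGet0 (s : String) (c0 : Char) (rest : List Char) (h : s.toList = c0 :: rest) :
    PySem.Str.pyGet? s 0 = some c0 := by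
  rw [show (0 : Int) = ((0 : Nat) : Int) from rfl, PySem.Str.pyGet?_natCast, h]
  rfl

theorem check_eq (s : String) (c0 : Char) (rest : List Char) (h : s.toList = c0 :: rest) :
    check s = (if c0 ≠ 'A' then false
      else if ((c0 :: rest).dropLast.drop 2).count 'C' ≠ 1 then false
      else decide (((c0 :: rest).countP lowc : Int) = ((c0 :: rest).length : Int) - 2)) := by
  unfold check
  rw [pyGet0 s c0 rest h]
  by_cases hc : c0 ≠ 'A'
  · simp only [if_pos hc]
  · simp only [if_neg hc]
    rw [slice_two_neg_one, h]
    by_cases h1 : ((c0 :: rest).dropLast.drop 2).count 'C' ≠ 1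
    · simp only [if_pos h1]
    · simp only [if_neg h1]
      simp only [PySem.List.len_eq]
      rw [PySem.List.foldl_pyRange_zero_pyGetD' (c0 :: rest) ' '
        (fun (cnt : Int) (c : Char) => if 'a' ≤ c ∧ c ≤ 'z' then cnt + 1 else cnt) 0]
      rw [PySem.List.foldl_ite_add_one, int_beq_eq_decide, pred_eq]
      norm_num

theorem alt_eq (s : String) (c0 : Char) (rest : List Char) (h : s.toList = c0 :: rest) :
    check_alt s = (if c0 ≠ 'A' then false else reFullmatchLowCLow rest) := by
  unfold check_alt
  rw [pyGet0 s c0 rest h]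
  by_cases hc : c0 ≠ 'A'
  · simp only [if_pos hc]
  · simp only [if_neg hc]
    rw [PySem.List.slice_from_one, h]
    rfl

-- ===== VERDICT (by name: the statement is the Claim_ definition above) =====
theorem check_spec : Claim_equal_check := by
  unfold Claim_equal_check
  intro s _ hpre
  unfold Spec_check
  unfold Pre_check at hpre
  obtain ⟨c0, rest, h⟩ : ∃ c0 rest, s.toList = c0 :: rest := by
    cases hs : s.toList with
    | nil => exact absurd hs hpre
    | cons a l => exact ⟨a, l, rfl⟩
  rw [check_eq s c0 rest h, alt_eq s c0 rest h]
  by_cases hc : c0 = 'A'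
  · subst hc
    have hnn : ¬('A' ≠ 'A') := by simp
    rw [if_neg hnn, if_neg hnn]
    exact key rest
  · rw [if_pos hc, if_pos hc]
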